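-- pv_equiv track=rewrite | github.com/pypi-data/pypi-mirror-401 | packages/QCut/qcut-0.9.0.tar.gz/qcut-0.9.0/QCut/QCutFind/refine.py | give_receive_qubits
-- ===== SOURCE A (Python) =====
-- def give_receive_qubits(qubits_per_partition, max_qubits):
--     copy_max_qubits = max_qubits.copy()
--     res = {}
--     for key, value in qubits_per_partition.items():
--         closest = min(
--             [(x, x - value, abs(x - value)) for x in copy_max_qubits],
--             key=lambda y: y[2],
--         )
--         res[key] = {"receive": closest[1], "q": value, "max_q": closest[0]}
--         copy_max_qubits.remove(closest[0])
--
--     return res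
-- ===== SOURCE B (Python) =====
-- def _bisect_left(a, x):
--     # textbook bisect_left (no imports allowed beyond what A uses)
--     lo, hi = 0, len(a)
--     while lo < hi:
--         mid = (lo + hi) // 2
--         if a[mid] < x:
--             lo = mid + 1
--         else:
--             hi = mid
--     return lo
--
--
-- def give_receive_qubits(qubits_per_partition, max_qubits):
--     # sorted pool of (value, original_index); per query, binary-search the two
--     # nearest values and break abs-difference ties by smallest original index
--     # (= first occurrence in A's shrinking copy of max_qubits).
--     pairs = sorted(((x, i) for i, x in enumerate(max_qubits)), key=lambda p: p[0])
--     vals = [p[0] for p in pairs]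
--     res = {}
--     for key, value in qubits_per_partition.items():
--         i = _bisect_left(vals, value)
--         if i < len(vals) and vals[i] == value:
--             k = i
--         elif i == len(vals):
--             k = _bisect_left(vals, vals[i - 1])
--         elif i == 0:
--             k = 0
--         else:
--             j = _bisect_left(vals, vals[i - 1])
--             dlo = value - vals[j]
--             dhi = vals[i] - value
--             if dlo < dhi or (dlo == dhi and pairs[j][1] < pairs[i][1]):
--                 k = j
--             else:
--                 k = i
--         x = pairs[k][0]
--         res[key] = {"receive": x - value, "q": value, "max_q": x}
--         del vals[k]
--         del pairs[k]
--     return res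
-- ===== Notes on version B (the rewrite author's own statement) =====
-- stated objective: faster
-- what changed: A rebuilds a triple list and scans the whole remaining pool with min() for every partition; B sorts (value, index) pairs once and answers each query by binary search for the two nearest values, breaking abs-difference ties by smallest original index, then deletes the chosen slot.
import Mathlib
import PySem

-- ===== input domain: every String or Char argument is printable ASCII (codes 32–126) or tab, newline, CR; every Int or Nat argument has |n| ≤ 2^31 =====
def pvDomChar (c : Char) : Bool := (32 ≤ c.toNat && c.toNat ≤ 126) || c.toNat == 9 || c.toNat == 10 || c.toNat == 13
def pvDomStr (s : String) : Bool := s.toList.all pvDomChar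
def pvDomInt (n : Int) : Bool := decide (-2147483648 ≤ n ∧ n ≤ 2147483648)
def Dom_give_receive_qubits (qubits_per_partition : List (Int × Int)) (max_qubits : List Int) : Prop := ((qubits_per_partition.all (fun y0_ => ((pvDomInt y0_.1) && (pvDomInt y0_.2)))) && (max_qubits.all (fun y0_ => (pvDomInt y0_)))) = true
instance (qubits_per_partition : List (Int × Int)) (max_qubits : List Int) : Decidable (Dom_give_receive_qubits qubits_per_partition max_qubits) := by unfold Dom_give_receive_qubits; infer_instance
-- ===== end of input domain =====

-- ===== PORT A =====
-- B rewrites A's per-partition full-pool min() scan as one initial sort plus a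
-- binary search per partition (tie on abs-difference broken by original index);
-- measured much faster at large sizes.
-- A-side helper: the loop body of A ('for key, value in qubits_per_partition.items()').
-- The 'none' branch is Python's ValueError (min() of an emptied pool): unreachable under Pre_.
def goA (items : List (Int × Int)) (copy : List Int)
    (res : PySem.Dict Int (List (String × Int))) : PySem.Dict Int (List (String × Int)) :=
  match items with
  | [] => res
  | (k, v) :: rest =>
    match PySem.List.min? (copy.map (fun x => (x, x - v, |x - v|))) (fun y => y.2.2) with
    | none => res
    | some closest =>
      goA rest ((PySem.List.remove? copy closest.1).getD copy)
        (res.insert k [("receive", closest.2.1), ("q", v), ("max_q", closest.1)])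

-- Under Pre_ the association list has distinct keys, so it is exactly dict.items().
def give_receive_qubits (qubits_per_partition : List (Int × Int)) (max_qubits : List Int) :
    List (Int × List (String × Int)) :=
  (goA qubits_per_partition max_qubits PySem.Dict.empty).items

-- ===== PORT B =====
-- Source B's hand-written `_bisect_left` is the textbook bisect_left loop; its port is the
-- prelude primitive PySem.List.bisectLeft (exact).
-- The index-choosing block of Source B's loop body.  vals[i-1] with i = 0 is Python's
-- vals[-1]; on the empty pool Python raises IndexError there (unreachable under Pre_,
-- pyGetD's default stands in for the raise).
def bChoose (vals : List Int) (pairs : List (Int × Int)) (v : Int) : Nat :=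
  let i := PySem.List.bisectLeft vals v
  if i < vals.length ∧ PySem.List.pyGetD vals (i : Int) 0 = v then i
  else if i = vals.length then
    PySem.List.bisectLeft vals (PySem.List.pyGetD vals ((i : Int) - 1) 0)
  else if i = 0 then 0
  else
    let j := PySem.List.bisectLeft vals (PySem.List.pyGetD vals ((i : Int) - 1) 0)
    let dlo := v - PySem.List.pyGetD vals (j : Int) 0
    let dhi := PySem.List.pyGetD vals (i : Int) 0 - v
    if dlo < dhi ∨ (dlo = dhi ∧
        (PySem.List.pyGetD pairs (j : Int) (0, 0)).2 < (PySem.List.pyGetD pairs (i : Int) (0, 0)).2) then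
      j
    else i

-- B-side loop body ('for key, value in qubits_per_partition.items()').
def goB (items : List (Int × Int)) (vals : List Int) (pairs : List (Int × Int))
    (res : PySem.Dict Int (List (String × Int))) : PySem.Dict Int (List (String × Int)) :=
  match items with
  | [] => res
  | (key, v) :: rest =>
    let k := bChoose vals pairs v
    let x := (PySem.List.pyGetD pairs (k : Int) (0, 0)).1
    goB rest (vals.eraseIdx k) (pairs.eraseIdx k)
      (res.insert key [("receive", x - v), ("q", v), ("max_q", x)])

def give_receive_qubits_alt (qubits_per_partition : List (Int × Int)) (max_qubits : List Int) :
    List (Int × List (String × Int)) :=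
  let pairs := PySem.List.sorted
    ((PySem.List.enumerate max_qubits 0).map (fun p => (p.2, p.1))) (fun p => p.1) false
  let vals := pairs.map (fun p => p.1)
  (goB qubits_per_partition vals pairs PySem.Dict.empty).items

-- ===== PRECONDITION & SPEC =====
-- Pre_ excludes (a) association lists with duplicate keys — a Python dict cannot hold
-- them, the list-to-dict marshalling collapses them, and on the collapsed dict both
-- programs agree anyway — and (b) inputs with more partitions than pool entries, on
-- which A's min() over the emptied pool raises ValueError (B's vals[-1] raises IndexError).
def Pre_give_receive_qubits (qubits_per_partition : List (Int × Int)) (max_qubits : List Int) : Prop :=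
  (qubits_per_partition.map Prod.fst).Nodup ∧ qubits_per_partition.length ≤ max_qubits.length
instance (qubits_per_partition : List (Int × Int)) (max_qubits : List Int) :
    Decidable (Pre_give_receive_qubits qubits_per_partition max_qubits) := by
  unfold Pre_give_receive_qubits; infer_instance

def pvWitness_give_receive_qubits : (List (Int × Int)) × List Int := ([(0, 2), (1, 5)], [3, 7])

def Spec_give_receive_qubits (qubits_per_partition : List (Int × Int)) (max_qubits : List Int) (out : List (Int × List (String × Int))) : Prop := out = give_receive_qubits_alt qubits_per_partition max_qubits
instance (qubits_per_partition : List (Int × Int)) (max_qubits : List Int) (out : List (Int × List (String × Int))) : Decidable (Spec_give_receive_qubits qubits_per_partition max_qubits out) := by unfold Spec_give_receive_qubits; infer_instance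

-- ===== CLAIM (what is proved, stated in full; the proofs are below) =====
def Claim_equal_give_receive_qubits : Prop := ∀ (qubits_per_partition : List (Int × Int)) (max_qubits : List Int), Dom_give_receive_qubits qubits_per_partition max_qubits → Pre_give_receive_qubits qubits_per_partition max_qubits → Spec_give_receive_qubits qubits_per_partition max_qubits (give_receive_qubits qubits_per_partition max_qubits)

-- ===== LEMMAS AND PROOFS =====

-- Lexicographic order on (value, original index) pairs: the order of B's sorted pool,
-- and (via the key (|value - v|, index)) A's min() preference order.
def pLex (a b : Int × Int) : Prop := a.1 < b.1 ∨ (a.1 = b.1 ∧ a.2 < b.2)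

lemma pLex_fst_le {a b : Int × Int} (h : pLex a b) : a.1 ≤ b.1 := by
  rcases h with h | ⟨h, _⟩ <;> omega

lemma absInt (a : Int) : |a| = if 0 ≤ a then a else -a := by
  split
  · exact abs_of_nonneg (by assumption)
  · exact abs_of_neg (by omega)

-- min? (a left fold) returns the first element attaining the minimal key.
lemma foldl_min_keep {A K : Type} [LinearOrder K] (key : A → K) (m : A) (post : List A)
    (h : ∀ y ∈ post, key m ≤ key y) :
    post.foldl (fun acc x => match acc with
      | none => some x
      | some mm => if key x < key mm then some x else some mm) (some m) = some m := by
  induction post with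
  | nil => rfl
  | cons p t ih =>
    have hp : key m ≤ key p := h p (by simp)
    simp only [List.foldl_cons]
    rw [if_neg (by exact not_lt.mpr hp)]
    exact ih (fun y hy => h y (by simp [hy]))

lemma foldl_min_reach {A K : Type} [LinearOrder K] (key : A → K) (m : A) (post : List A)
    (hpost : ∀ y ∈ post, key m ≤ key y) :
    ∀ (pre : List A) (a : A), key m < key a → (∀ y ∈ pre, key m < key y) →
    (pre ++ m :: post).foldl (fun acc x => match acc with
      | none => some x
      | some mm => if key x < key mm then some x else some mm) (some a) = some m := by
  intro pre
  induction pre with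
  | nil =>
    intro a ha _
    simp only [List.nil_append, List.foldl_cons]
    rw [if_pos ha]
    exact foldl_min_keep key m post hpost
  | cons p t ih =>
    intro a ha hpre
    simp only [List.cons_append, List.foldl_cons]
    by_cases hpa : key p < key a
    · rw [if_pos hpa]
      exact ih p (hpre p (by simp)) (fun y hy => hpre y (by simp [hy]))
    · rw [if_neg hpa]
      exact ih a ha (fun y hy => hpre y (by simp [hy]))

lemma min?_of_split {A K : Type} [LinearOrder K] (key : A → K) (pre post : List A) (m : A)
    (hpre : ∀ y ∈ pre, key m < key y) (hpost : ∀ y ∈ post, key m ≤ key y) :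
    PySem.List.min? (pre ++ m :: post) key = some m := by
  unfold PySem.List.min?
  cases pre with
  | nil =>
    simp only [List.nil_append, List.foldl_cons]
    exact foldl_min_keep key m post hpost
  | cons p t =>
    simp only [List.cons_append, List.foldl_cons]
    exact foldl_min_reach key m post hpost t p (hpre p (by simp)) (fun y hy => hpre y (by simp [hy]))

-- Stability of the initial sort: inserting pairs in increasing-index order keeps
-- equal values index-ordered, so B's pool is pLex-sorted.
lemma mem_insertBy {A : Type} (b : A → A → Bool) (x : A) (l : List A) (y : A)
    (h : y ∈ PySem.List.insertBy b x l) : y = x ∨ y ∈ l := by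
  induction l with
  | nil => simp [PySem.List.insertBy] at h; tauto
  | cons p t ih =>
    unfold PySem.List.insertBy at h
    by_cases hb : b x p = true
    · simp [hb] at h
      rcases h with h | h | h <;> simp [h]
    · simp [hb] at h
      rcases h with h | h
      · simp [h]
      · rcases ih h with h | h <;> simp [h]

lemma insertBy_pairwise_pLex (x : Int × Int) (l : List (Int × Int))
    (h1 : l.Pairwise pLex) (h2 : ∀ a ∈ l, a.2 < x.2) :
    (PySem.List.insertBy (fun a b => decide (a.1 < b.1)) x l).Pairwise pLex := by
  induction l with
  | nil => simp [PySem.List.insertBy]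
  | cons p t ih =>
    unfold PySem.List.insertBy
    by_cases hb : x.1 < p.1
    · simp only [hb, decide_true, if_pos]
      constructor
      · intro z hz
        rcases hz with _ | hz
        · exact Or.inl hb
        · rcases List.pairwise_cons.mp h1 with ⟨hpz, _⟩
          exact Or.inl (lt_of_lt_of_le hb (pLex_fst_le (hpz _ (by assumption))))
      · exact h1
    · simp only [hb, decide_false, Bool.false_eq_true, if_neg, not_false_iff]
      rcases List.pairwise_cons.mp h1 with ⟨hpt, ht⟩
      constructor
      · intro z hz
        rcases mem_insertBy _ _ _ _ hz with rfl | hz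
        · -- pLex p x : ¬ x.1 < p.1 → p.1 ≤ x.1; p.2 < x.2
          have := h2 p (by simp)
          unfold pLex; omega
        · exact hpt z hz
      · exact ih ht (fun a ha => h2 a (by simp [ha]))

lemma sorted_fst_pairwise_pLex (l : List (Int × Int)) (h : l.Pairwise (fun a b => a.2 < b.2)) :
    (PySem.List.sorted l (fun p => p.1) false).Pairwise pLex := by
  unfold PySem.List.sorted
  suffices H : ∀ (l acc : List (Int × Int)), l.Pairwise (fun a b => a.2 < b.2) →
      acc.Pairwise pLex → (∀ a ∈ acc, ∀ b ∈ l, a.2 < b.2) →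
      (l.foldl (fun acc x => PySem.List.insertBy (fun a b => decide (a.1 < b.1)) x acc) acc).Pairwise pLex by
    exact H l [] h (by simp) (by simp)
  intro l
  induction l with
  | nil => intro acc _ ha _; simpa using ha
  | cons p t ih =>
    intro acc hl ha hab
    simp only [List.foldl_cons]
    rcases List.pairwise_cons.mp hl with ⟨hpt, ht⟩
    refine ih _ ht (insertBy_pairwise_pLex p acc ha (fun a haa => hab a haa p (by simp))) ?_
    intro a haa b hb
    rcases mem_insertBy _ _ _ _ haa with rfl | haa
    · exact hpt b hb
    · exact hab a haa b (by simp [hb])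

-- Erasing the chosen entry: A's remove-by-value and B's delete-by-slot take out
-- the same element.
lemma map_fst_erase (R : List (Int × Int)) (e : Int × Int)
    (hR : R.Pairwise (fun a b => a.2 < b.2)) (he : e ∈ R)
    (hmin : ∀ a ∈ R, a.1 = e.1 → e.2 ≤ a.2) :
    (R.map Prod.fst).erase e.1 = (R.erase e).map Prod.fst := by
  induction R with
  | nil => simp at he
  | cons a t ih =>
    rcases List.pairwise_cons.mp hR with ⟨hat, ht⟩
    by_cases hae : a = e
    · subst hae
      simp [List.erase_cons_head]
    · have h3 : e ∈ t := by
        rcases List.mem_cons.mp he with h | h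
        · exact absurd h.symm hae
        · exact h
      have h1 : a.1 ≠ e.1 := by
        intro h
        have h2 := hmin a (by simp) h
        have := hat e h3
        omega
      rw [List.map_cons, List.erase_cons, List.erase_cons, if_neg (by simp [h1]),
        if_neg (by simp [hae]), List.map_cons,
        ih ht h3 (fun b hb hb1 => hmin b (by simp [hb]) hb1)]

lemma eraseIdx_eq_erase {A : Type} [BEq A] [LawfulBEq A] (l : List A) (k : Nat) (e : A)
    (hnd : l.Nodup) (h : l[k]? = some e) : l.eraseIdx k = l.erase e := by
  induction l generalizing k with
  | nil => simp at h
  | cons a t ih =>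
    cases k with
    | zero =>
      simp at h
      subst h
      simp [List.erase_cons_head]
    | succ n =>
      simp only [List.getElem?_cons_succ] at h
      have het : e ∈ t := List.mem_of_getElem? h
      have hane : a ≠ e := by
        intro hh; subst hh
        exact (List.nodup_cons.mp hnd).1 het
      rw [List.eraseIdx_cons_succ, List.erase_cons, if_neg (by simp [hane]),
        ih n (List.nodup_cons.mp hnd).2 h]

-- The selection lemma: B's chosen slot holds the entry that minimises
-- (|value - v|, original index) lexicographically.
lemma select (pairs : List (Int × Int)) (v : Int)
    (hs : pairs.Pairwise pLex) (hnd : (pairs.map Prod.snd).Nodup) (hne : pairs ≠ []) :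
    ∃ e, pairs[bChoose (pairs.map Prod.fst) pairs v]? = some e ∧
      ∀ b ∈ pairs, b ≠ e →
        |e.1 - v| < |b.1 - v| ∨ (|e.1 - v| = |b.1 - v| ∧ e.2 < b.2) := by
  set vals := pairs.map Prod.fst with hvals
  set n := pairs.length with hn
  have hlen : vals.length = n := by simp [hvals, hn]
  have hnpos : 0 < n := by
    cases pairs with
    | nil => exact absurd rfl hne
    | cons a t => simp [hn]
  have hv : ∀ (m : Nat) (hm : m < n), vals[m]'(by omega) = (pairs[m]'hm).1 := by
    intro m hm; simp [hvals]
  have hgetv : ∀ (m : Nat) (hm : m < n), PySem.List.pyGetD vals (m : Int) 0 = (pairs[m]'hm).1 := by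
    intro m hm
    rw [PySem.List.pyGetD_natCast, List.getD_eq_getElem _ _ (by omega), hv m hm]
  have hgetp : ∀ (m : Nat) (hm : m < n), PySem.List.pyGetD pairs (m : Int) (0, 0) = pairs[m]'hm := by
    intro m hm
    rw [PySem.List.pyGetD_natCast, List.getD_eq_getElem _ _ (by omega)]
  have hlex : ∀ (j1 j2 : Nat) (h1 : j1 < j2) (h2 : j2 < n),
      pLex (pairs[j1]'(by omega)) (pairs[j2]'h2) := by
    intro j1 j2 h1 h2
    exact List.pairwise_iff_getElem.mp hs j1 j2 (by omega) h2 h1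
  have hmono : ∀ (j1 j2 : Nat), (h1 : j1 ≤ j2) → (h2 : j2 < n) → (pairs[j1]'(by omega)).1 ≤ (pairs[j2]'h2).1 := by
    intro j1 j2 h1 h2
    rcases Nat.lt_or_ge j1 j2 with h | h
    · exact pLex_fst_le (hlex j1 j2 h h2)
    · have : j1 = j2 := by omega
      subst this; exact le_refl _
  have hsndpw : pairs.Pairwise (fun a b => a.2 ≠ b.2) := List.pairwise_map.mp hnd
  have hsnd : ∀ (j1 j2 : Nat) (h1 : j1 < n) (h2 : j2 < n), j1 ≠ j2 →
      (pairs[j1]'h1).2 ≠ (pairs[j2]'h2).2 := by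
    intro j1 j2 h1 h2 hne12
    rcases Nat.lt_or_ge j1 j2 with h | h
    · exact List.pairwise_iff_getElem.mp hsndpw j1 j2 (by omega) h2 h
    · exact fun heq =>
        (List.pairwise_iff_getElem.mp hsndpw j2 j1 (by omega) h1 (by omega)) heq.symm
  have hsorted : vals.Pairwise (· ≤ ·) := List.pairwise_map.mpr (hs.imp pLex_fst_le)
  obtain ⟨hile, hblt, hbge⟩ := PySem.List.bisectLeft_spec vals v hsorted
  set i := PySem.List.bisectLeft vals v with hi
  rw [hlen] at hile
  -- reduce to finding k with property P
  suffices H : ∃ (k : Nat) (hk : k < n), bChoose vals pairs v = k ∧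
      (∀ (j' : Nat) (hj' : j' < n), j' ≠ k →
        |(pairs[k]'hk).1 - v| < |(pairs[j']'hj').1 - v| ∨
        (|(pairs[k]'hk).1 - v| = |(pairs[j']'hj').1 - v| ∧ (pairs[k]'hk).2 < (pairs[j']'hj').2)) by
    obtain ⟨k, hk, hbc, hP⟩ := H
    refine ⟨pairs[k]'hk, by rw [hbc]; exact List.getElem?_eq_getElem hk, ?_⟩
    intro b hb hbne
    obtain ⟨j', hj', rfl⟩ := List.mem_iff_getElem.mp hb
    exact hP j' hj' (fun h => hbne (by subst h; rfl))
  rw [bChoose]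
  simp only [← hi, hlen]
  by_cases hc1 : i < n ∧ PySem.List.pyGetD vals (i : Int) 0 = v
  · -- exact match
    rw [if_pos hc1]
    obtain ⟨hiltn, hvi⟩ := hc1
    rw [hgetv i hiltn] at hvi
    refine ⟨i, hiltn, rfl, ?_⟩
    intro j' hj' hne'
    rcases Nat.lt_or_ge j' i with h | h
    · have := hblt j' (by omega) h
      rw [hv j' hj'] at this
      left
      rw [absInt, absInt]
      split_ifs <;> omega
    · have hgt : i < j' := by omega
      rcases hlex i j' hgt hj' with hlt | ⟨heq, hlt2⟩
      · left
        rw [absInt, absInt]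
        split_ifs <;> omega
      · right
        constructor
        · rw [heq]
        · exact hlt2
  · rw [if_neg hc1]
    by_cases hc2 : i = n
    · -- all values < v : take first slot of the maximal value
      rw [if_pos hc2]
      have hallv : ∀ (m : Nat) (hm : m < n), (pairs[m]'hm).1 < v := by
        intro m hm
        have := hblt m (by omega) (by omega)
        rwa [hv m hm] at this
      have hcast : (i : Int) - 1 = ((n - 1 : Nat) : Int) := by omega
      rw [hcast, hgetv (n - 1) (by omega)]
      set lo := (pairs[n - 1]'(by omega)).1 with hlo
      obtain ⟨hjle, hjlt, hjge⟩ := PySem.List.bisectLeft_spec vals lo hsorted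
      set j := PySem.List.bisectLeft vals lo with hj
      rw [hlen] at hjle
      have hjlt' : ∀ (m : Nat) (hm : m < n), m < j → (pairs[m]'hm).1 < lo := by
        intro m hm hmj
        have := hjlt m (by omega) hmj
        rwa [hv m hm] at this
      have hjge' : ∀ (m : Nat) (hm : m < n), j ≤ m → lo ≤ (pairs[m]'hm).1 := by
        intro m hm hmj
        have := hjge m (by omega) hmj
        rwa [hv m hm] at this
      have hjn : j < n := by
        by_contra h
        have := hjlt' (n - 1) (by omega) (by omega)
        omega
      have hle_lo : ∀ (m : Nat) (hm : m < n), (pairs[m]'hm).1 ≤ lo := by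
        intro m hm
        exact hmono m (n - 1) (by omega) (by omega)
      have hvj : (pairs[j]'hjn).1 = lo :=
        le_antisymm (hle_lo j hjn) (hjge' j hjn (le_refl _))
      refine ⟨j, hjn, rfl, ?_⟩
      intro j' hj' hne'
      rcases Nat.lt_or_ge j' j with h | h
      · have h1 := hjlt' j' hj' h
        have h2 := hallv j' hj'
        have h3 := hallv j hjn
        left
        rw [absInt, absInt]
        split_ifs <;> omega
      · have hgt : j < j' := by omega
        have h1 : (pairs[j']'hj').1 = lo :=
          le_antisymm (hle_lo j' hj') (hjge' j' hj' (by omega))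
        rcases hlex j j' hgt hj' with hlt | ⟨heq, hlt2⟩
        · omega
        · right
          constructor
          · rw [heq]
          · exact hlt2
    · rw [if_neg hc2]
      by_cases hc3 : i = 0
      · -- all values > v : take the first slot
        rw [if_pos hc3]
        have h0n : 0 < n := hnpos
        have hvge : ∀ (m : Nat) (hm : m < n), v ≤ (pairs[m]'hm).1 := by
          intro m hm
          have := hbge m (by omega) (by omega)
          rwa [hv m hm] at this
        have hv0 : v < (pairs[0]'h0n).1 := by
          rcases lt_or_eq_of_le (hvge 0 h0n) with h | h
          · exact h
          · exfalso
            exact hc1 ⟨by omega, by rw [hc3] at *; rw [hgetv 0 h0n]; omega⟩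
        refine ⟨0, h0n, rfl, ?_⟩
        intro j' hj' hne'
        have hgt : 0 < j' := by omega
        have h1 := hvge j' hj'
        rcases hlex 0 j' hgt hj' with hlt | ⟨heq, hlt2⟩
        · left
          rw [absInt, absInt]
          split_ifs <;> omega
        · right
          constructor
          · rw [heq]
          · exact hlt2
      · -- two-sided case
        rw [if_neg hc3]
        have hiltn : i < n := by omega
        have hipos : 0 < i := by omega
        have hcast : (i : Int) - 1 = ((i - 1 : Nat) : Int) := by omega
        rw [hcast, hgetv (i - 1) (by omega)]
        set lo := (pairs[i - 1]'(by omega)).1 with hlo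
        have hlolt : lo < v := by
          have := hblt (i - 1) (by omega) (by omega)
          rwa [hv (i - 1) (by omega)] at this
        have hhigt : v < (pairs[i]'hiltn).1 := by
          have h1 := hbge i (by omega) (le_refl _)
          rw [hv i hiltn] at h1
          rcases lt_or_eq_of_le h1 with h | h
          · exact h
          · exact absurd ⟨hiltn, by rw [hgetv i hiltn]; omega⟩ hc1
        obtain ⟨hjle, hjlt, hjge⟩ := PySem.List.bisectLeft_spec vals lo hsorted
        set j := PySem.List.bisectLeft vals lo with hj
        rw [hlen] at hjle
        have hjlt' : ∀ (m : Nat) (hm : m < n), m < j → (pairs[m]'hm).1 < lo := by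
          intro m hm hmj
          have := hjlt m (by omega) hmj
          rwa [hv m hm] at this
        have hjge' : ∀ (m : Nat) (hm : m < n), j ≤ m → lo ≤ (pairs[m]'hm).1 := by
          intro m hm hmj
          have := hjge m (by omega) hmj
          rwa [hv m hm] at this
        have hji : j ≤ i - 1 := by
          by_contra h
          have := hjlt' (i - 1) (by omega) (by omega)
          omega
        have hjn : j < n := by omega
        have hmid : ∀ (m : Nat) (hm : m < n), j ≤ m → m ≤ i - 1 → (pairs[m]'hm).1 = lo := by
          intro m hm h1 h2
          exact le_antisymm (hmono m (i - 1) h2 (by omega)) (hjge' m hm h1)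
        have hvj : (pairs[j]'hjn).1 = lo := hmid j hjn (le_refl _) hji
        have hhiup : ∀ (m : Nat) (hm : m < n), i ≤ m → (pairs[i]'hiltn).1 ≤ (pairs[m]'hm).1 := by
          intro m hm h1
          exact hmono i m h1 hm
        rw [hgetv j hjn, hgetv i hiltn, hgetp j hjn, hgetp i hiltn, hvj]
        by_cases hc4 : v - lo < (pairs[i]'hiltn).1 - v ∨
            (v - lo = (pairs[i]'hiltn).1 - v ∧ (pairs[j]'hjn).2 < (pairs[i]'hiltn).2)
        · -- pick the lower value's first slot
          rw [if_pos hc4]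
          refine ⟨j, hjn, rfl, ?_⟩
          intro j' hj' hne'
          rcases Nat.lt_or_ge j' j with h | h
          · have h1 := hjlt' j' hj' h
            left
            rw [absInt, absInt]
            split_ifs <;> omega
          · rcases Nat.lt_or_ge j' i with h2 | h2
            · -- j < j' ≤ i-1 : same value, later slot
              have hgt : j < j' := by omega
              have h1 := hmid j' hj' (by omega) (by omega)
              rcases hlex j j' hgt hj' with hlt | ⟨heq, hlt2⟩
              · omega
              · exact Or.inr ⟨by rw [hvj, h1], hlt2⟩
            · -- j' ≥ i : upper side
              have h1 := hhiup j' hj' h2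
              rcases hc4 with hlt4 | ⟨heq4, hlt4⟩
              · left
                rw [absInt, absInt]
                split_ifs <;> omega
              · rcases Nat.lt_or_ge i j' with h3 | h3
                · rcases hlex i j' h3 hj' with hlt | ⟨heq, hlt2⟩
                  · left
                    rw [hvj, absInt, absInt]
                    split_ifs <;> omega
                  · right
                    refine ⟨?_, by omega⟩
                    rw [hvj, absInt, absInt]
                    split_ifs <;> omega
                · have : j' = i := by omega
                  subst this
                  right
                  constructor
                  · rw [hvj, absInt, absInt]
                    split_ifs <;> omega
                  · omega
        · -- pick the upper value's first slot
          rw [if_neg hc4]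
          push Not at hc4
          obtain ⟨hge4, htie4⟩ := hc4
          refine ⟨i, hiltn, rfl, ?_⟩
          intro j' hj' hne'
          rcases Nat.lt_or_ge j' j with h | h
          · have h1 := hjlt' j' hj' h
            left
            rw [absInt, absInt]
            split_ifs <;> omega
          · rcases Nat.lt_or_ge j' i with h2 | h2
            · -- j ≤ j' < i : value lo
              have h1 := hmid j' hj' h (by omega)
              rcases lt_or_eq_of_le hge4 with h4 | h4
              · left
                rw [absInt, absInt]
                split_ifs <;> omega
              · -- tie: pairs[i].2 ≤ pairs[j].2, and strict by nodup
                have h5 := htie4 h4.symm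
                have h6 : (pairs[i]'hiltn).2 ≠ (pairs[j]'hjn).2 := hsnd i j hiltn hjn (by omega)
                have h7 : (pairs[i]'hiltn).2 < (pairs[j]'hjn).2 := by omega
                have h8 : (pairs[j]'hjn).2 ≤ (pairs[j']'hj').2 := by
                  rcases Nat.lt_or_ge j j' with h9 | h9
                  · rcases hlex j j' h9 hj' with hlt | ⟨heq, hlt2⟩
                    · omega
                    · omega
                  · have : j' = j := by omega
                    subst this; exact le_refl _
                right
                constructor
                · rw [absInt, absInt]
                  split_ifs <;> omega
                · omega
            · -- j' > i (j' = i excluded)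
              have hgt : i < j' := by omega
              rcases hlex i j' hgt hj' with hlt | ⟨heq, hlt2⟩
              · left
                rw [absInt, absInt]
                split_ifs <;> omega
              · right
                constructor
                · rw [heq]
                · exact hlt2

-- The joint induction: with R the remaining pool in original order and pairs its
-- pLex-sorted rearrangement, both loops produce the same dict.
lemma go_eq (items : List (Int × Int)) :
    ∀ (R pairs : List (Int × Int)) (res : PySem.Dict Int (List (String × Int))),
    items.length ≤ R.length →
    R.Pairwise (fun a b => a.2 < b.2) →
    pairs.Perm R →
    pairs.Pairwise pLex →
    goA items (R.map Prod.fst) res = goB items (pairs.map Prod.fst) pairs res := by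
  induction items with
  | nil => intro R pairs res _ _ _ _; rfl
  | cons kv rest ih =>
    obtain ⟨k, v⟩ := kv
    intro R pairs res hlen hR hperm hsorted
    have hlen' : pairs.length = R.length := hperm.length_eq
    have hRne : R ≠ [] := by
      intro h; subst h; simp at hlen
    have hpne : pairs ≠ [] := by
      intro h; subst h; simp at hlen'
      exact hRne (List.length_eq_zero_iff.mp hlen'.symm)
    have hRsnd : (R.map Prod.snd).Pairwise (· < ·) := List.pairwise_map.mpr hR
    have hRsndnd : (R.map Prod.snd).Nodup := hRsnd.imp (fun h => ne_of_lt h)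
    have hpsndnd : (pairs.map Prod.snd).Nodup := ((hperm.map Prod.snd).nodup_iff).mpr hRsndnd
    have hRnd : R.Nodup := List.Nodup.of_map _ hRsndnd
    have hpnd : pairs.Nodup := List.Nodup.of_map _ hpsndnd
    obtain ⟨e, hE, hS2⟩ := select pairs v hsorted hpsndnd hpne
    set kk := bChoose (pairs.map Prod.fst) pairs v with hkk
    have hkn : kk < pairs.length := by
      by_contra h
      rw [List.getElem?_eq_none_iff.mpr (by omega)] at hE
      cases hE
    have hEe : pairs[kk]'hkn = e := by
      rw [List.getElem?_eq_getElem hkn] at hE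
      exact Option.some.inj hE
    have hgx : (PySem.List.pyGetD pairs ((kk : Nat) : Int) (0, 0)).1 = e.1 := by
      rw [PySem.List.pyGetD_natCast, List.getD_eq_getElem _ _ hkn, hEe]
    have heR : e ∈ R := hperm.mem_iff.mp (by rw [← hEe]; exact List.getElem_mem hkn)
    have hS2R : ∀ b ∈ R, b ≠ e → |e.1 - v| < |b.1 - v| ∨ (|e.1 - v| = |b.1 - v| ∧ e.2 < b.2) :=
      fun b hb => hS2 b (hperm.mem_iff.mpr hb)
    -- A's min
    obtain ⟨R1, R2, hRsplit⟩ := List.append_of_mem heR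
    have heR1 : e ∉ R1 := by
      intro h
      have := hRnd
      rw [hRsplit] at this
      rcases List.nodup_append.mp this with ⟨_, h2, h3⟩
      exact h3 e h e (by simp) rfl
    have hR1lt : ∀ a ∈ R1, a.2 < e.2 := by
      have := hR
      rw [hRsplit] at this
      rcases List.pairwise_append.mp this with ⟨_, _, h3⟩
      exact fun a ha => h3 a ha e (by simp)
    have heR2 : e ∉ R2 := by
      have := hRnd
      rw [hRsplit] at this
      rcases List.nodup_append.mp this with ⟨_, h2, _⟩
      exact fun h => (List.nodup_cons.mp h2).1 h
    have hmin : PySem.List.min? ((R.map Prod.fst).map (fun x => (x, x - v, |x - v|)))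
        (fun y => y.2.2) = some (e.1, e.1 - v, |e.1 - v|) := by
      rw [hRsplit]
      simp only [List.map_append, List.map_cons]
      refine min?_of_split _ _ _ _ ?_ ?_
      · intro y hy
        simp only [List.map_map, List.mem_map] at hy
        obtain ⟨a, ha, rfl⟩ := hy
        have hane : a ≠ e := fun h => heR1 (h ▸ ha)
        rcases hS2R a (by rw [hRsplit]; simp [ha]) hane with h | ⟨h1, h2⟩
        · simpa using h
        · exact absurd (hR1lt a ha) (by omega)
      · intro y hy
        simp only [List.map_map, List.mem_map] at hy
        obtain ⟨a, ha, rfl⟩ := hy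
        have hane : a ≠ e := fun h => heR2 (h ▸ ha)
        rcases hS2R a (by rw [hRsplit]; simp [ha]) hane with h | ⟨h1, h2⟩
        · simpa using le_of_lt h
        · simpa using le_of_eq h1
    -- the removal
    have hminR : ∀ a ∈ R, a.1 = e.1 → e.2 ≤ a.2 := by
      intro a ha h1
      by_cases hae : a = e
      · subst hae; exact le_refl _
      · rcases hS2R a ha hae with h | ⟨_, h2⟩
        · rw [h1] at h; omega
        · omega
    have hremove : (PySem.List.remove? (R.map Prod.fst) e.1).getD (R.map Prod.fst)
        = (R.erase e).map Prod.fst := by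
      rw [PySem.List.remove?_eq_some_erase _ _ (List.mem_map_of_mem heR), Option.getD_some,
        map_fst_erase R e hR heR hminR]
    have hpairs' : pairs.eraseIdx kk = pairs.erase e := eraseIdx_eq_erase pairs kk e hpnd hE
    have hvals' : (pairs.map Prod.fst).eraseIdx kk = (pairs.eraseIdx kk).map Prod.fst :=
      List.eraseIdx_map _ _ _
    -- step
    have hstepA : goA ((k, v) :: rest) (R.map Prod.fst) res
        = goA rest ((R.erase e).map Prod.fst)
          (res.insert k [("receive", e.1 - v), ("q", v), ("max_q", e.1)]) := by
      conv_lhs => rw [goA]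
      rw [hmin]
      show goA rest ((PySem.List.remove? (R.map Prod.fst) e.1).getD (R.map Prod.fst))
        (res.insert k [("receive", e.1 - v), ("q", v), ("max_q", e.1)]) = _
      rw [hremove]
    have hstepB : goB ((k, v) :: rest) (pairs.map Prod.fst) pairs res
        = goB rest ((pairs.erase e).map Prod.fst) (pairs.erase e)
          (res.insert k [("receive", e.1 - v), ("q", v), ("max_q", e.1)]) := by
      conv_lhs => rw [goB]
      rw [← hkk, hgx, hvals', hpairs']
    rw [hstepA, hstepB]
    exact ih (R.erase e) (pairs.erase e) _
      (by rw [List.length_erase_of_mem heR]; simp at hlen; omega)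
      (List.Pairwise.sublist List.erase_sublist hR)
      (hperm.erase e)
      (List.Pairwise.sublist (hpairs' ▸ (List.eraseIdx_sublist pairs kk)) hsorted)

-- ===== VERDICT (by name: the statement is the Claim_ definition above) =====
theorem give_receive_qubits_spec : Claim_equal_give_receive_qubits := by
  unfold Claim_equal_give_receive_qubits
  intro qpp mq _hdom hpre
  unfold Spec_give_receive_qubits give_receive_qubits give_receive_qubits_alt
  set R : List (Int × Int) := (PySem.List.enumerate mq 0).map (fun p => (p.2, p.1)) with hRdef
  have hmap : R.map Prod.fst = mq := by
    rw [hRdef, List.map_map]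
    exact PySem.List.map_snd_enumerate mq 0
  have hRpw : R.Pairwise (fun a b => a.2 < b.2) :=
    List.pairwise_map.mpr (by simpa using PySem.List.pairwise_lt_enumerate mq 0)
  have hlenR : qpp.length ≤ R.length := by
    rw [hRdef, List.length_map, PySem.List.length_enumerate]
    exact hpre.2
  rw [← hmap]
  rw [go_eq qpp R (PySem.List.sorted R (fun p => p.1) false) PySem.Dict.empty hlenR hRpw
    (PySem.List.sorted_perm R (fun p => p.1) false) (sorted_fst_pairwise_pLex R hRpw)]
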